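-- pv_equiv track=rewrite | github.com/MoisesCharris/Moises-Charris-Alba | Tercer Corte/Ejercicios py 19 mayo/Ejercicio 7.py | clasificar_numeros
-- ===== SOURCE A (Python) =====
-- def clasificar_numeros(lista, k):
--     menores = []
--     mayores = []
--     iguales = []
--     multiplos = []
--
--     for numero in lista:
--         if numero < k:
--             menores.append(numero)
--         elif numero > k:
--             mayores.append(numero)
--         else:
--             iguales.append(numero)
--
--         if numero % k == 0:
--             multiplos.append(numero)
--
--     return menores, mayores, iguales, multiplos
-- ===== SOURCE B (Python) =====
-- def clasificar_numeros(lista, k):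
--     menores = [n for n in lista if n < k]
--     mayores = [n for n in lista if n > k]
--     iguales = [n for n in lista if n == k]
--     multiplos = [n for n in lista if n % k == 0]
--     return menores, mayores, iguales, multiplos
-- ===== Notes on version B (the rewrite author's own statement) =====
-- stated objective: simpler
-- what changed: Replaces the single interleaved loop with four branching appends by four independent filtering comprehensions, one per output list.
import Mathlib
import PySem

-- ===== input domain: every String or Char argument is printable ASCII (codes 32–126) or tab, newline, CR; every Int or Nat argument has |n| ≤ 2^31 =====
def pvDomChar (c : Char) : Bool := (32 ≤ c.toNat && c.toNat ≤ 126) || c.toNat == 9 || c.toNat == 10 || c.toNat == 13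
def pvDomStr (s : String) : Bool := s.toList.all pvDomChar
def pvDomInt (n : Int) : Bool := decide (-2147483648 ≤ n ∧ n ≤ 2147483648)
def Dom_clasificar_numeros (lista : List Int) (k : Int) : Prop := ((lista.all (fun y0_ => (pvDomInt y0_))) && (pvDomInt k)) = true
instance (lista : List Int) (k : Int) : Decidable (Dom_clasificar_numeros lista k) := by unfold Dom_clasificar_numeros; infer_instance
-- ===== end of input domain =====

-- B replaces A's single interleaved loop with four independent filtering passes (simpler decomposition).


-- ===== PORT A =====
-- one pass over lista, four accumulators appended at the back, branches in A's order
def clasificar_numeros (lista : List Int) (k : Int) : List Int × List Int × List Int × List Int :=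
  lista.foldl
    (fun acc numero =>
      let (menores, mayores, iguales, multiplos) := acc
      let (menores, mayores, iguales) :=
        if numero < k then (menores ++ [numero], mayores, iguales)
        else if numero > k then (menores, mayores ++ [numero], iguales)
        else (menores, mayores, iguales ++ [numero])
      let multiplos := if PySem.Int.mod numero k = 0 then multiplos ++ [numero] else multiplos
      (menores, mayores, iguales, multiplos))
    ([], [], [], [])

-- ===== PORT B =====
-- four independent filtering passes, one per comprehension in Source B
def clasificar_numeros_alt (lista : List Int) (k : Int) : List Int × List Int × List Int × List Int :=
  (lista.filter (fun n => n < k),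
   lista.filter (fun n => n > k),
   lista.filter (fun n => n == k),
   lista.filter (fun n => PySem.Int.mod n k == 0))

-- ===== PRECONDITION & SPEC =====
-- Pre_ excludes only the inputs where Python A raises ZeroDivisionError: k = 0 with a non-empty lista.
def Pre_clasificar_numeros (lista : List Int) (k : Int) : Prop := lista = [] ∨ k ≠ 0
instance (lista : List Int) (k : Int) : Decidable (Pre_clasificar_numeros lista k) := by unfold Pre_clasificar_numeros; infer_instance
def pvWitness_clasificar_numeros : List Int × Int := ([3, -1, 4, 4, 0, 9], 4)
def Spec_clasificar_numeros (lista : List Int) (k : Int) (out : List Int × List Int × List Int × List Int) : Prop := out = clasificar_numeros_alt lista k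
instance (lista : List Int) (k : Int) (out : List Int × List Int × List Int × List Int) : Decidable (Spec_clasificar_numeros lista k out) := by unfold Spec_clasificar_numeros; infer_instance

-- ===== CLAIM (what is proved, stated in full; the proofs are below) =====
def Claim_equal_clasificar_numeros : Prop := ∀ (lista : List Int) (k : Int), Dom_clasificar_numeros lista k → Pre_clasificar_numeros lista k → Spec_clasificar_numeros lista k (clasificar_numeros lista k)

-- ===== LEMMAS AND PROOFS =====
theorem clasificar_numeros_fold (lista : List Int) (k : Int)
    (m M e u : List Int) :
    lista.foldl
      (fun acc numero =>
        let (menores, mayores, iguales, multiplos) := acc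
        let (menores, mayores, iguales) :=
          if numero < k then (menores ++ [numero], mayores, iguales)
          else if numero > k then (menores, mayores ++ [numero], iguales)
          else (menores, mayores, iguales ++ [numero])
        let multiplos := if PySem.Int.mod numero k = 0 then multiplos ++ [numero] else multiplos
        (menores, mayores, iguales, multiplos))
      (m, M, e, u)
    = (m ++ lista.filter (fun n => n < k),
       M ++ lista.filter (fun n => n > k),
       e ++ lista.filter (fun n => n == k),
       u ++ lista.filter (fun n => PySem.Int.mod n k == 0)) := by
  induction lista generalizing m M e u with
  | nil => simp
  | cons x xs ih =>
    simp only [List.foldl_cons, List.filter_cons]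
    by_cases h1 : x < k
    · have h2 : ¬ x > k := by omega
      have h3 : ¬ (x == k) = true := by simp; omega
      by_cases h4 : PySem.Int.mod x k = 0 <;>
        simp [h1, h2, h3, h4, ih, List.append_assoc]
    · by_cases h2 : x > k
      · have h3 : ¬ (x == k) = true := by simp; omega
        by_cases h4 : PySem.Int.mod x k = 0 <;>
          simp [h1, h2, h3, h4, ih, List.append_assoc]
      · have h3 : (x == k) = true := by simp; omega
        by_cases h4 : PySem.Int.mod x k = 0 <;>
          simp [h1, h2, h3, h4, ih, List.append_assoc]

-- ===== VERDICT (by name: the statement is the Claim_ definition above) =====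
theorem clasificar_numeros_spec : Claim_equal_clasificar_numeros := by
  intro lista k _ _
  unfold Spec_clasificar_numeros clasificar_numeros clasificar_numeros_alt
  simpa using clasificar_numeros_fold lista k [] [] [] []
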